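-- pv_equiv track=rewrite | github.com/ivanxma/HW-NLSQL-py | app.py | _pick_memory_columns
-- ===== SOURCE A (Python) =====
-- def _pick_present_column(columns, candidates):
--     column_lookup = {column.lower(): column for column in columns}
--     for candidate in candidates:
--         resolved = column_lookup.get(candidate.lower())
--         if resolved:
--             return resolved
--     return ""
--
-- def _pick_memory_columns(columns):
--     preferred = [
--         "memory_used",
--         "memory_usage",
--         "used_memory",
--         "total_memory",
--         "free_memory",
--         "memory_size",
--         "ram_size",
--         "ram_usage",
--     ]
--     matches = []
--     for candidate in preferred:
--         resolved = _pick_present_column(columns, [candidate])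
--         if resolved and resolved not in matches:
--             matches.append(resolved)
--     for column in columns:
--         if "memory" in column.lower() and column not in matches:
--             matches.append(column)
--     return matches
-- ===== SOURCE B (Python) =====
-- def _pick_memory_columns(columns):
--     preferred = [
--         "memory_used",
--         "memory_usage",
--         "used_memory",
--         "total_memory",
--         "free_memory",
--         "memory_size",
--         "ram_size",
--         "ram_usage",
--     ]
--     wanted = set(preferred)
--     chosen = {}
--     for column in columns:
--         low = column.lower()
--         if low in wanted:
--             chosen[low] = column
--     matches = [chosen[name] for name in preferred if name in chosen]
--     seen = set(matches)
--     for column in columns: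
--         if "memory" in column.lower() and column not in seen:
--             matches.append(column)
--             seen.add(column)
--     return matches
-- ===== Notes on version B (the rewrite author's own statement) =====
-- stated objective: faster
-- what changed: A rebuilds the full lower-cased column dictionary once per preferred candidate (8 dict-comprehension passes over columns); B builds one filtered dict in a single pass over columns, reads the preferred matches out of it, and uses a cumulative seen-set for the second phase instead of scanning the growing matches list.
import Mathlib
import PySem

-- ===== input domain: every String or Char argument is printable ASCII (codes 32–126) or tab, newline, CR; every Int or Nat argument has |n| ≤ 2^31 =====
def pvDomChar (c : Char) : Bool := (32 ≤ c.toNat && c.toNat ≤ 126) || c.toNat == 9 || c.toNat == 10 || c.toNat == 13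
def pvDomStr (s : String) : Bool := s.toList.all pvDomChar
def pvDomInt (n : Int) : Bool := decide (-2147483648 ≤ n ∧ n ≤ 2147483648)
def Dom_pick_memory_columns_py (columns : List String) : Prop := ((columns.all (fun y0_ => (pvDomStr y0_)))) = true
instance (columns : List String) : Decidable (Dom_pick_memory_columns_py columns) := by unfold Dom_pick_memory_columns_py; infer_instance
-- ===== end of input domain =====

-- B builds the lowered-column dictionary once (filtered to the preferred names) instead of once
-- per preferred candidate, and keeps a cumulative seen-set in the second phase.

-- ===== PORT A =====
-- the 'for candidate in candidates: ... return resolved / return ""' loop of _pick_present_column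
def pick_present_loop (lookup : PySem.Dict String String) : List String → String
  | [] => ""
  | candidate :: rest =>
    match lookup.get? (PySem.Str.lower candidate) with
    | some resolved => if resolved ≠ "" then resolved else pick_present_loop lookup rest
    | none => pick_present_loop lookup rest

def pick_present_column_py (columns : List String) (candidates : List String) : String :=
  let column_lookup : PySem.Dict String String :=
    columns.foldl (fun d column => d.insert (PySem.Str.lower column) column) PySem.Dict.empty
  pick_present_loop column_lookup candidates

def pick_memory_columns_py (columns : List String) : List String :=
  let preferred : List String :=
    ["memory_used", "memory_usage", "used_memory", "total_memory",
     "free_memory", "memory_size", "ram_size", "ram_usage"]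
  let ms :=
    preferred.foldl (fun ms candidate =>
      let resolved := pick_present_column_py columns [candidate]
      if resolved ≠ "" ∧ resolved ∉ ms then ms ++ [resolved] else ms) []
  columns.foldl (fun ms column =>
    if PySem.Str.isIn "memory" (PySem.Str.lower column) = true ∧ column ∉ ms
    then ms ++ [column] else ms) ms

-- ===== PORT B =====
def pick_memory_columns_py_alt (columns : List String) : List String :=
  let preferred : List String :=
    ["memory_used", "memory_usage", "used_memory", "total_memory",
     "free_memory", "memory_size", "ram_size", "ram_usage"]
  let wanted : PySem.Set String := PySem.Set.ofList preferred
  let chosen : PySem.Dict String String :=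
    columns.foldl (fun d column =>
      let low := PySem.Str.lower column
      if PySem.Set.contains wanted low = true then d.insert low column else d) PySem.Dict.empty
  let ms := preferred.filterMap (fun name => chosen.get? name)
  let final :=
    columns.foldl (fun (st : List String × PySem.Set String) column =>
      if PySem.Str.isIn "memory" (PySem.Str.lower column) = true ∧ PySem.Set.contains st.2 column ≠ true
      then (st.1 ++ [column], PySem.Set.add st.2 column) else st)
      (ms, PySem.Set.ofList ms)
  final.1

-- ===== PRECONDITION & SPEC =====
def Spec_pick_memory_columns_py (columns : List String) (out : List String) : Prop := out = pick_memory_columns_py_alt columns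
instance (columns : List String) (out : List String) : Decidable (Spec_pick_memory_columns_py columns out) := by unfold Spec_pick_memory_columns_py; infer_instance

-- ===== CLAIM (what is proved, stated in full; the proofs are below) =====
def Claim_equal_pick_memory_columns_py : Prop := ∀ (columns : List String), Dom_pick_memory_columns_py columns → Spec_pick_memory_columns_py columns (pick_memory_columns_py columns)

-- ===== LEMMAS AND PROOFS =====

-- last column (by position) whose lowercase equals k
def pvLastM (cols : List String) (k : String) : Option String :=
  cols.foldl (fun acc c => if k = PySem.Str.lower c then some c else acc) none

def pvPref : List String :=
  ["memory_used", "memory_usage", "used_memory", "total_memory",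
   "free_memory", "memory_size", "ram_size", "ram_usage"]

theorem pvLastM_foldl (cols : List String) (k : String) (init : Option String) :
    cols.foldl (fun acc c => if k = PySem.Str.lower c then some c else acc) init
      = (pvLastM cols k).or init := by
  induction cols generalizing init with
  | nil => simp [pvLastM]
  | cons c cs ih =>
    simp only [pvLastM, List.foldl_cons]
    by_cases h : k = PySem.Str.lower c
    · simp only [if_pos h]
      rw [ih (some c)]
      rcases List.foldl (fun acc c => if k = PySem.Str.lower c then some c else acc) none cs with _ | v <;> simp
    · simp only [if_neg h]
      exact ih init

theorem pvLastM_spec (k : String) :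
    ∀ (cols : List String) (r : String), pvLastM cols k = some r → PySem.Str.lower r = k := by
  intro cols
  induction cols with
  | nil => intro r h; simp [pvLastM] at h
  | cons c cs ih =>
    intro r h
    have hc : pvLastM (c :: cs) k
        = (pvLastM cs k).or (if k = PySem.Str.lower c then some c else none) := by
      simp only [pvLastM, List.foldl_cons]
      rw [pvLastM_foldl]
      rfl
    rw [hc] at h
    rcases ho : pvLastM cs k with _ | r'
    · rw [ho, Option.none_or] at h
      by_cases hk : k = PySem.Str.lower c
      · rw [if_pos hk] at h
        injection h with h
        subst h
        exact hk.symm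
      · rw [if_neg hk] at h
        cases h
    · rw [ho, Option.some_or] at h
      injection h with h
      subst h
      exact ih r' ho

theorem dictA_get (cols : List String) (d : PySem.Dict String String) (k : String) :
    (cols.foldl (fun d c => d.insert (PySem.Str.lower c) c) d).get? k
      = cols.foldl (fun acc c => if k = PySem.Str.lower c then some c else acc) (d.get? k) := by
  induction cols generalizing d with
  | nil => rfl
  | cons c cs ih =>
    simp only [List.foldl_cons, ih, PySem.Dict.get?_insert]

theorem dictB_get (W : PySem.Set String) (cols : List String) (d : PySem.Dict String String)
    (k : String) (hk : PySem.Set.contains W k = true) :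
    (cols.foldl (fun d c =>
        if PySem.Set.contains W (PySem.Str.lower c) = true
        then d.insert (PySem.Str.lower c) c else d) d).get? k
      = cols.foldl (fun acc c => if k = PySem.Str.lower c then some c else acc) (d.get? k) := by
  induction cols generalizing d with
  | nil => rfl
  | cons c cs ih =>
    simp only [List.foldl_cons]
    by_cases hw : PySem.Set.contains W (PySem.Str.lower c) = true
    · simp only [if_pos hw, ih, PySem.Dict.get?_insert]
    · have hne : ¬ k = PySem.Str.lower c := by
        intro he; exact hw (he ▸ hk)
      simp only [if_neg hw, ih, if_neg hne]

theorem pvLower_empty : PySem.Str.lower "" = "" := by decide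

-- phase 1: A's dedup-append fold over distinct nonempty lowercase keys equals filterMap
theorem phase1 (g : String → Option String)
    (hg : ∀ k r, g k = some r → PySem.Str.lower r = k) :
    ∀ (ks m : List String), ks.Nodup → (∀ k ∈ ks, k ≠ "") →
      (∀ r ∈ m, PySem.Str.lower r ∉ ks) →
      ks.foldl (fun m cand =>
        match g cand with
        | some r => if r ≠ "" ∧ r ∉ m then m ++ [r] else m
        | none => m) m
      = m ++ ks.filterMap g := by
  intro ks
  induction ks with
  | nil => intro m _ _ _; simp
  | cons k ks ih =>
    intro m hnd hne hinv
    simp only [List.foldl_cons, List.filterMap_cons]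
    rcases hgk : g k with _ | r
    · exact ih m hnd.of_cons (fun a ha => hne a (List.mem_cons_of_mem _ ha))
          (fun r hr hmem => hinv r hr (List.mem_cons_of_mem _ hmem))
    · have hlow : PySem.Str.lower r = k := hg _ _ hgk
      have hrne : r ≠ "" := by
        intro he
        exact hne k List.mem_cons_self (by rw [← hlow, he, pvLower_empty])
      have hrnm : r ∉ m := fun hmem => hinv r hmem (hlow ▸ List.mem_cons_self)
      have hcond : r ≠ "" ∧ r ∉ m := ⟨hrne, hrnm⟩
      simp only [if_pos hcond]
      rw [ih (m ++ [r]) hnd.of_cons (fun a ha => hne a (List.mem_cons_of_mem _ ha))]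
      · simp
      · intro r' hr'
        rcases List.mem_append.mp hr' with h | h
        · exact fun hmem => hinv r' h (List.mem_cons_of_mem _ hmem)
        · simp only [List.mem_singleton] at h
          subst h
          rw [hlow]
          exact (List.nodup_cons.mp hnd).1

-- phase 2: the pair fold with a seen-set tracking the output list equals A's plain fold
theorem phase2 (cols : List String) :
    ∀ (m : List String) (s : PySem.Set String), (∀ x, PySem.Set.contains s x = true ↔ x ∈ m) →
    (cols.foldl (fun (st : List String × PySem.Set String) column =>
        if PySem.Str.isIn "memory" (PySem.Str.lower column) = true ∧ PySem.Set.contains st.2 column ≠ true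
        then (st.1 ++ [column], PySem.Set.add st.2 column) else st) (m, s)).1
      = cols.foldl (fun ms column =>
        if PySem.Str.isIn "memory" (PySem.Str.lower column) = true ∧ column ∉ ms
        then ms ++ [column] else ms) m := by
  induction cols with
  | nil => intro m s _; rfl
  | cons c cs ih =>
    intro m s hs
    simp only [List.foldl_cons]
    have hmem : (PySem.Set.contains s c ≠ true) ↔ (c ∉ m) := by
      constructor
      · intro h hc; exact h ((hs c).mpr hc)
      · intro h hc; exact h ((hs c).mp hc)
    by_cases hc : PySem.Str.isIn "memory" (PySem.Str.lower c) = true ∧ c ∉ m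
    · rw [if_pos (⟨hc.1, hmem.mpr hc.2⟩ : _ ∧ _), if_pos hc]
      apply ih
      intro x
      rw [PySem.Set.contains_iff, PySem.Set.mem_add, List.mem_append, List.mem_singleton,
          ← PySem.Set.contains_iff, hs]
    · have hnc : ¬ (PySem.Str.isIn "memory" (PySem.Str.lower c) = true ∧ PySem.Set.contains s c ≠ true) := by
        intro hp; exact hc ⟨hp.1, hmem.mp hp.2⟩
      rw [if_neg hnc, if_neg hc]
      exact ih m s hs

theorem present_one (columns : List String) (cand : String) :
    pick_present_column_py columns [cand]
      = match pvLastM columns (PySem.Str.lower cand) with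
        | some r => if r ≠ "" then r else ""
        | none => "" := by
  simp only [pick_present_column_py, pick_present_loop, dictA_get, PySem.Dict.get?_empty, pvLastM]

theorem pvPref_facts : pvPref.Nodup ∧ (∀ k ∈ pvPref, k ≠ "") ∧ (∀ k ∈ pvPref, PySem.Str.lower k = k) := by
  decide

theorem lemA (columns : List String) :
    pick_memory_columns_py columns
      = columns.foldl (fun ms column =>
          if PySem.Str.isIn "memory" (PySem.Str.lower column) = true ∧ column ∉ ms
          then ms ++ [column] else ms)
        (pvPref.filterMap (fun k => pvLastM columns k)) := by
  simp only [pick_memory_columns_py]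
  rw [show (["memory_used", "memory_usage", "used_memory", "total_memory",
     "free_memory", "memory_size", "ram_size", "ram_usage"] : List String) = pvPref from rfl]
  congr 1
  rw [PySem.List.foldl_congr_mem pvPref _
    (fun m cand =>
      match pvLastM columns cand with
      | some r => if r ≠ "" ∧ r ∉ m then m ++ [r] else m
      | none => m) []
    (by
      intro acc x hx
      simp only [present_one, pvPref_facts.2.2 x hx]
      rcases h : pvLastM columns x with _ | r
      · simp
      · by_cases hr : r = "" <;> simp [hr])]
  rw [phase1 (fun k => pvLastM columns k) (fun k r h => pvLastM_spec k columns r h)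
        pvPref [] pvPref_facts.1 pvPref_facts.2.1 (by simp)]
  simp

-- ===== VERDICT (by name: the statement is the Claim_ definition above) =====
theorem pick_memory_columns_py_spec : Claim_equal_pick_memory_columns_py := by
  intro columns _
  unfold Spec_pick_memory_columns_py
  rw [lemA]
  simp only [pick_memory_columns_py_alt]
  rw [show (["memory_used", "memory_usage", "used_memory", "total_memory",
     "free_memory", "memory_size", "ram_size", "ram_usage"] : List String) = pvPref from rfl]
  rw [phase2 columns _ _ (fun x => by rw [PySem.Set.contains_iff, PySem.Set.mem_ofList])]
  have hM : pvPref.filterMap (fun name =>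
      (columns.foldl (fun d column =>
        if PySem.Set.contains (PySem.Set.ofList pvPref) (PySem.Str.lower column) = true
        then d.insert (PySem.Str.lower column) column else d) PySem.Dict.empty).get? name)
      = pvPref.filterMap (fun k => pvLastM columns k) := by
    apply List.filterMap_congr
    intro x hx
    rw [dictB_get (PySem.Set.ofList pvPref) columns PySem.Dict.empty x
        (by rw [PySem.Set.contains_iff, PySem.Set.mem_ofList]; exact hx)]
    rw [show (PySem.Dict.empty : PySem.Dict String String).get? x = none from rfl]
    rfl
  rw [hM]
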